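-- pv_equiv track=rewrite | github.com/luizaugustoliveira/Algoritmos | Dicionários/time_campeao/time.py | time_campeao
-- ===== SOURCE A (Python) =====
-- def time_campeao(dados):
--     pontos = []
--     for lista in dados.values():
--         pontos.append(lista[0])
--
--     maior = pontos[0]
--     for i in range(len(pontos)):
--         if pontos[i] > maior:
--             maior = pontos[i]
--
--     campeao = []
--     for time, valores in dados.items():
--         if valores[0] == maior:
--             campeao.append(time)
--
--     return campeao
-- ===== SOURCE B (Python) =====
-- def time_campeao(dados):
--     items = list(dados.items())
--     maior = items[0][1][0]
--     campeao = []
--     for time, valores in items: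
--         v = valores[0]
--         if v > maior:
--             maior = v
--             campeao = [time]
--         elif v == maior:
--             campeao.append(time)
--     return campeao
-- ===== Notes on version B (the rewrite author's own statement) =====
-- stated objective: simpler
-- what changed: Replaced A's three separate passes (collect first values, find the max by index loop, filter the keys) by one single pass that maintains the running maximum and the current leader list together, resetting the list when a strictly greater value appears.
import Mathlib
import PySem

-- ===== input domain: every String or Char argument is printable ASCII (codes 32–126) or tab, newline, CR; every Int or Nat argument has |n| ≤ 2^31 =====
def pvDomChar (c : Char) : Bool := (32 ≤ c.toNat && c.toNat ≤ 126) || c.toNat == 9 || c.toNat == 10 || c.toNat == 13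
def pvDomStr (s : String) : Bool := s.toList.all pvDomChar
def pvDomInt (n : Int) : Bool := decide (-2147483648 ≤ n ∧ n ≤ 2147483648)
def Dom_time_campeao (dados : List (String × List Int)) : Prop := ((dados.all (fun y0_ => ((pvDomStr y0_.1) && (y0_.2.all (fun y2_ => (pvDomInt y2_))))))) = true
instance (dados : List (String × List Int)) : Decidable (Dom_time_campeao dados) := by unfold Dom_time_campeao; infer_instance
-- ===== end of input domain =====

-- B replaces A's three passes (collect firsts, index-loop max, filter keys) by one
-- single pass maintaining the running maximum and leader list together (objective: simpler).


-- ===== PORT A =====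
def time_campeao (dados : List (String × List Int)) : List String :=
  let pontos := dados.foldl (fun acc p => acc ++ [PySem.List.pyGetD p.2 0 0]) []
  let maior0 := PySem.List.pyGetD pontos 0 0
  let maior := (PySem.List.pyRange 0 pontos.length 1).foldl
      (fun m i => if PySem.List.pyGetD pontos i 0 > m then PySem.List.pyGetD pontos i 0 else m) maior0
  dados.foldl (fun acc p => if PySem.List.pyGetD p.2 0 0 = maior then acc ++ [p.1] else acc) []

-- ===== PORT B =====
def time_campeao_alt (dados : List (String × List Int)) : List String :=
  let m0 := PySem.List.pyGetD (PySem.List.pyGetD dados 0 ("", [])).2 0 0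
  let r := dados.foldl (fun (st : Int × List String) p =>
      let v := PySem.List.pyGetD p.2 0 0
      if v > st.1 then (v, [p.1])
      else if v = st.1 then (st.1, st.2 ++ [p.1]) else st) (m0, [])
  r.2

-- ===== PRECONDITION & SPEC =====
-- Pre_ excludes exactly the inputs where A raises IndexError (empty dict, or an entry whose
-- value list is empty), plus duplicate keys, which a Python dict cannot have anyway.
def Pre_time_campeao (dados : List (String × List Int)) : Prop :=
  dados ≠ [] ∧ (∀ p ∈ dados, p.2 ≠ []) ∧ (dados.map Prod.fst).Nodup
instance (dados : List (String × List Int)) : Decidable (Pre_time_campeao dados) := by unfold Pre_time_campeao; infer_instance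
def pvWitness_time_campeao : (List (String × List Int)) := [("a", [3, 1]), ("b", [3]), ("c", [2])]
def Spec_time_campeao (dados : List (String × List Int)) (out : List String) : Prop := out = time_campeao_alt dados
instance (dados : List (String × List Int)) (out : List String) : Decidable (Spec_time_campeao dados out) := by unfold Spec_time_campeao; infer_instance

-- ===== CLAIM (what is proved, stated in full; the proofs are below) =====
def Claim_equal_time_campeao : Prop := ∀ (dados : List (String × List Int)), Dom_time_campeao dados → Pre_time_campeao dados → Spec_time_campeao dados (time_campeao dados)

-- ===== LEMMAS AND PROOFS =====

def pvFirst (p : String × List Int) : Int := PySem.List.pyGetD p.2 0 0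
def pvMaxStep (m x : Int) : Int := if x > m then x else m

lemma pvMaxStep_le (m : Int) (x : Int) : m ≤ pvMaxStep m x := by
  unfold pvMaxStep; split <;> omega

lemma foldl_pvMaxStep_ge (l : List Int) (m : Int) : m ≤ l.foldl pvMaxStep m := by
  induction l generalizing m with
  | nil => simp
  | cons x xs ih => exact le_trans (pvMaxStep_le m x) (ih _)

lemma b_fold_inv (xs : List (String × List Int)) (m : Int) (c : List String) :
    xs.foldl (fun (st : Int × List String) p =>
        let v := pvFirst p
        if v > st.1 then (v, [p.1])
        else if v = st.1 then (st.1, st.2 ++ [p.1]) else st) (m, c)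
      = ((xs.map pvFirst).foldl pvMaxStep m,
         (if (xs.map pvFirst).foldl pvMaxStep m = m then c else []) ++
           (xs.filter (fun p => pvFirst p = (xs.map pvFirst).foldl pvMaxStep m)).map Prod.fst) := by
  induction xs generalizing m c with
  | nil => simp
  | cons p xs ih =>
    simp only [List.foldl_cons, List.map_cons, List.filter_cons]
    rcases lt_trichotomy m (pvFirst p) with h1 | h1 | h1
    · -- strictly greater: reset
      have hm : pvMaxStep m (pvFirst p) = pvFirst p := by unfold pvMaxStep; simp [h1]
      have hge := foldl_pvMaxStep_ge (xs.map pvFirst) (pvFirst p)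
      have hne : (xs.map pvFirst).foldl pvMaxStep (pvFirst p) ≠ m := by omega
      simp only [gt_iff_lt, h1, if_true, hm, ih, hne, if_false, List.nil_append,
        decide_eq_true_eq]
      by_cases h2 : pvFirst p = (xs.map pvFirst).foldl pvMaxStep (pvFirst p)
      · rw [if_pos h2.symm, if_pos h2]; simp
      · rw [if_neg (fun h => h2 h.symm), if_neg h2]; simp
    · -- equal: append
      subst h1
      have hm : pvMaxStep (pvFirst p) (pvFirst p) = pvFirst p := by unfold pvMaxStep; simp
      have hge := foldl_pvMaxStep_ge (xs.map pvFirst) (pvFirst p)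
      simp only [gt_iff_lt, lt_irrefl, if_false, if_true, hm, ih, decide_eq_true_eq]
      by_cases h3 : (xs.map pvFirst).foldl pvMaxStep (pvFirst p) = pvFirst p
      · rw [if_pos h3, if_pos h3, if_pos h3.symm]; simp
      · rw [if_neg h3, if_neg h3, if_neg (fun h => h3 h.symm)]
    · -- strictly smaller: skip
      have hm : pvMaxStep m (pvFirst p) = m := by
        unfold pvMaxStep
        have : ¬ pvFirst p > m := by omega
        simp [this]
      have hge := foldl_pvMaxStep_ge (xs.map pvFirst) m
      have hgt : ¬ pvFirst p > m := by omega
      have hne2 : ¬ pvFirst p = m := by omega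
      have hne3 : ¬ pvFirst p = (xs.map pvFirst).foldl pvMaxStep m := by omega
      simp only [gt_iff_lt, hm, ih, decide_eq_true_eq]
      rw [if_neg (by omega : ¬ m < pvFirst p), if_neg hne2, if_neg hne3]

-- ===== VERDICT (by name: the statement is the Claim_ definition above) =====
theorem time_campeao_spec : Claim_equal_time_campeao := by
  intro dados _ hpre
  obtain ⟨hne, -, -⟩ := hpre
  obtain ⟨d, ds, rfl⟩ := List.exists_cons_of_ne_nil hne
  show time_campeao (d :: ds) = time_campeao_alt (d :: ds)
  unfold time_campeao time_campeao_alt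
  simp only [PySem.List.foldl_append_singleton_eq_map, List.nil_append]
  rw [show (fun (st : Int × List String) (p : String × List Int) =>
        let v := PySem.List.pyGetD p.2 0 0
        if v > st.1 then (v, [p.1])
        else if v = st.1 then (st.1, st.2 ++ [p.1]) else st)
      = (fun (st : Int × List String) p =>
        let v := pvFirst p
        if v > st.1 then (v, [p.1])
        else if v = st.1 then (st.1, st.2 ++ [p.1]) else st) from rfl,
     show PySem.List.pyGetD (PySem.List.pyGetD (d :: ds) 0 ("", [])).2 0 0 = pvFirst d from by
       rw [PySem.List.pyGetD_zero_cons]; rfl,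
     b_fold_inv]
  have hrange := PySem.List.foldl_pyRange_zero_pyGetD'
      ((d :: ds).map (fun p => PySem.List.pyGetD p.2 0 0)) 0
      (fun m x => if x > m then x else m)
      (PySem.List.pyGetD ((d :: ds).map (fun p => PySem.List.pyGetD p.2 0 0)) 0 0)
  simp only [hrange]
  rw [show ((d :: ds).map (fun p => PySem.List.pyGetD p.2 0 0)) = ((d :: ds).map pvFirst) from rfl,
     show (fun m x => if x > m then x else m) = pvMaxStep from funext fun m => funext fun x => by unfold pvMaxStep; rfl,
     show PySem.List.pyGetD ((d :: ds).map pvFirst) 0 0 = pvFirst d from by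
       rw [List.map_cons, PySem.List.pyGetD_zero_cons]]
  have hA := PySem.List.foldl_append_if
      (fun p : String × List Int => pvFirst p = ((d :: ds).map pvFirst).foldl pvMaxStep (pvFirst d))
      Prod.fst (d :: ds) ([] : List String)
  rw [ite_self]
  simpa using hA
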